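-- pv_equiv track=rewrite | github.com/JairoMartinezA/cuda_case_converter | format_case.py | do_conv_string
-- ===== SOURCE A (Python) =====
-- MODE_SNAKE  = 1
--
-- MODE_UPPER  = 2
--
-- MODE_CAMEL  = 3
--
-- MODE_PAS    = 4
--
-- STAT_BEGIN  = 0
--
-- STAT_CHANGE = 1
--
-- STAT_OTHER  = 2
--
-- def do_conv_char(ch, mode, state):
--     if mode==MODE_SNAKE:
--         return ch.lower()
--     if mode==MODE_UPPER:
--         return ch.upper()
--
--     if state==STAT_BEGIN:
--         if mode==MODE_PAS:
--             return ch.upper()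
--         else:
--             return ch.lower()
--     elif state==STAT_CHANGE:
--         if (mode==MODE_PAS) or (mode==MODE_CAMEL):
--             return ch.upper()
--         else:
--             return ch.lower()
--     elif state==STAT_OTHER:
--         return ch.lower()
--
-- def do_conv_string(text, mode):
--     result = ''
--     res_pre = ''
--     res_post = ''
--
--     # preserve lead/trail underscores
--     while text.startswith('_'):
--         res_pre += '_'
--         text = text[1:]
--     while text.endswith('_'):
--         res_post += '_'
--         text = text[:-1]
--
--     for i in range(len(text)):
--         if text[i]=='_':
--             continue
--
--         if i==0:
--             stat=STAT_BEGIN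
--         elif (text[i-1]=='_') or (text[i].isupper() and text[i-1].islower()):
--             stat=STAT_CHANGE
--         else:
--             stat=STAT_OTHER
--
--         ch = do_conv_char(text[i], mode, stat)
--         if (stat==STAT_CHANGE) and (mode==MODE_SNAKE or mode==MODE_UPPER):
--             result += '_'
--         result += ch
--
--     return res_pre + result + res_post
-- ===== SOURCE B (Python) =====
-- def do_conv_string(text, mode):
--     # Different decomposition: strip underscore runs, split into words, join per mode.
--     t = text.lstrip('_')
--     pre = '_' * (len(text) - len(t))
--     core = t.rstrip('_')
--     post = '_' * (len(t) - len(core))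
--
--     words = []
--     cur = ''
--     prev = None
--     for ch in core:
--         if ch == '_':
--             if cur:
--                 words.append(cur)
--                 cur = ''
--         else:
--             if cur and ch.isupper() and prev.islower():
--                 words.append(cur)
--                 cur = ch
--             else:
--                 cur += ch
--         prev = ch
--     if cur:
--         words.append(cur)
--
--     if mode == 1:
--         body = '_'.join(w.lower() for w in words)
--     elif mode == 2:
--         body = '_'.join(w.upper() for w in words)
--     elif mode == 4:
--         body = ''.join(w.capitalize() for w in words)
--     elif mode == 3:
--         body = words[0].lower() + ''.join(w.capitalize() for w in words[1:]) if words else ''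
--     else:
--         body = ''.join(w.lower() for w in words)
--     return pre + body + post
-- ===== Notes on version B (the rewrite author's own statement) =====
-- stated objective: alternative
-- what changed: A converts character by character with a three-state (begin/change/other) machine deciding each output char and separator inline and appending to a string; B strips underscore runs, splits the text into a list of words at underscore runs and lower-to-upper boundaries, and joins/capitalizes the word list per mode with str.join.
import Mathlib
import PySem

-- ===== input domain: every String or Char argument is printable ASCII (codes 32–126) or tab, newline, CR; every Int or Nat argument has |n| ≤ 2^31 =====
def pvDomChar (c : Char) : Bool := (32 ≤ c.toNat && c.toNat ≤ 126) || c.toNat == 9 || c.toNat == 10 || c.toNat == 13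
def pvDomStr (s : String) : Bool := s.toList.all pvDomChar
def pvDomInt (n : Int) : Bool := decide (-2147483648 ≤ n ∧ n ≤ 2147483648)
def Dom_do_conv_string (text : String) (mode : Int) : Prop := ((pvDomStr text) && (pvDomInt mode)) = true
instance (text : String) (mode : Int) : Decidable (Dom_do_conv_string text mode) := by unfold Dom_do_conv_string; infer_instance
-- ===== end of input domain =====

-- B replaces A's per-character state machine by a strip/split-into-words/join-per-mode decomposition (alternative, not claimed faster).

-- ===== PORT A =====
-- ch.lower() / ch.upper() / ch.isupper() / ch.islower() on one char → PySem.Chars primitives (exact on Dom's ASCII)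

-- do_conv_char: A returns None for a state outside {0,1,2}; it is only ever called with 0/1/2, and the
-- port's final else is the state==STAT_OTHER branch.
def do_conv_char (ch : Char) (mode : Int) (state : Int) : Char :=
  if mode = 1 then PySem.Chars.lowerChar ch
  else if mode = 2 then PySem.Chars.upperChar ch
  else if state = 0 then (if mode = 4 then PySem.Chars.upperChar ch else PySem.Chars.lowerChar ch)
  else if state = 1 then (if mode = 4 ∨ mode = 3 then PySem.Chars.upperChar ch else PySem.Chars.lowerChar ch)
  else PySem.Chars.lowerChar ch

-- A's "while text.startswith('_'): res_pre += '_'; text = text[1:]" loop: returns (res_pre, remaining text)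
def pvStripPreA : List Char → List Char × List Char
  | [] => ([], [])
  | c :: r => if c = '_' then ('_' :: (pvStripPreA r).1, (pvStripPreA r).2) else ([], c :: r)

-- A's main for-loop over range(len(text)); prev = text[i-1] (none at i==0), result built left to right
def pvLoopA (mode : Int) : Option Char → List Char → List Char
  | _, [] => []
  | prev, c :: rest =>
    if c = '_' then pvLoopA mode (some '_') rest
    else
      let stat : Int :=
        match prev with
        | none => 0
        | some p => if p = '_' ∨ (PySem.Chars.isupper c ∧ PySem.Chars.islower p) then 1 else 2
      (if stat = 1 ∧ (mode = 1 ∨ mode = 2) then ['_'] else []) ++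
        do_conv_char c mode stat :: pvLoopA mode (some c) rest

-- "while text.endswith('_'): res_post += '_'; text = text[:-1]" is the same strip loop seen from the right
def do_conv_string (text : String) (mode : Int) : String :=
  String.mk ((pvStripPreA text.toList).1 ++
    pvLoopA mode none (pvStripPreA (pvStripPreA text.toList).2.reverse).2.reverse ++
    (pvStripPreA (pvStripPreA text.toList).2.reverse).1)

-- ===== PORT B =====
-- prev.islower() in Source B's boundary test; prev is never None there (cur nonempty)
def pyIsLowerOpt : Option Char → Bool
  | some p => PySem.Chars.islower p
  | none => false

-- Source B's for-loop: state (words so far, current word, previous char)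
def pvLoopB : List (List Char) → List Char → Option Char → List Char → List (List Char)
  | ws, cur, _, [] => ws ++ (if cur = [] then [] else [cur])
  | ws, cur, prev, c :: r =>
    if c = '_' then
      pvLoopB (ws ++ (if cur = [] then [] else [cur])) [] (some '_') r
    else if cur ≠ [] ∧ PySem.Chars.isupper c ∧ pyIsLowerOpt prev then
      pvLoopB (ws ++ [cur]) [c] (some c) r
    else
      pvLoopB ws (cur ++ [c]) (some c) r

-- sep.join(list of strings), ported by hand (exact join semantics)
def pyJoin (sep : List Char) : List (List Char) → List Char
  | [] => []
  | w :: ws => w ++ ws.flatMap (fun v => sep ++ v)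

-- w.capitalize() on ASCII: first char uppercased, rest lowercased
def pyCapList : List Char → List Char
  | [] => []
  | a :: t => PySem.Chars.upperChar a :: t.map PySem.Chars.lowerChar

def pvRenderB (mode : Int) (ws : List (List Char)) : List Char :=
  if mode = 1 then pyJoin ['_'] (ws.map (List.map PySem.Chars.lowerChar))
  else if mode = 2 then pyJoin ['_'] (ws.map (List.map PySem.Chars.upperChar))
  else if mode = 4 then pyJoin [] (ws.map pyCapList)
  else if mode = 3 then
    match ws with
    | [] => []
    | w :: rest => w.map PySem.Chars.lowerChar ++ pyJoin [] (rest.map pyCapList)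
  else pyJoin [] (ws.map (List.map PySem.Chars.lowerChar))

-- t = text.lstrip('_'); pre = '_'*(len(text)-len(t)); core = t.rstrip('_'); post = '_'*(len(t)-len(core))
def do_conv_string_alt (text : String) (mode : Int) : String :=
  String.mk
    (List.replicate (text.toList.length - (text.toList.dropWhile (· = '_')).length) '_' ++
     pvRenderB mode (pvLoopB [] [] none
       ((text.toList.dropWhile (· = '_')).reverse.dropWhile (· = '_')).reverse) ++
     List.replicate ((text.toList.dropWhile (· = '_')).length -
       (((text.toList.dropWhile (· = '_')).reverse.dropWhile (· = '_')).reverse).length) '_')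

-- ===== PRECONDITION & SPEC =====
def Spec_do_conv_string (text : String) (mode : Int) (out : String) : Prop := out = do_conv_string_alt text mode
instance (text : String) (mode : Int) (out : String) : Decidable (Spec_do_conv_string text mode out) := by unfold Spec_do_conv_string; infer_instance

-- ===== CLAIM (what is proved, stated in full; the proofs are below) =====
def Claim_equal_do_conv_string : Prop := ∀ (text : String) (mode : Int), Dom_do_conv_string text mode → Spec_do_conv_string text mode (do_conv_string text mode)

-- ===== LEMMAS AND PROOFS =====

-- generic word rendering: head char by h, remaining chars by g
def renderW (h g : Char → Char) : List Char → List Char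
  | [] => []
  | a :: t => h a :: t.map g

-- render a word list: first word with f1, later words with f, separated by sep
def renderAll (f1 f g : Char → Char) (sep : List Char) : List (List Char) → List Char
  | [] => []
  | w :: rest => renderW f1 g w ++ rest.flatMap (fun v => sep ++ renderW f g v)

theorem renderW_self (g : Char → Char) (w : List Char) : renderW g g w = w.map g := by
  cases w <;> simp [renderW]

theorem renderW_append (h g : Char → Char) (w : List Char) (c : Char) (hw : w ≠ []) :
    renderW h g (w ++ [c]) = renderW h g w ++ [g c] := by
  cases w with
  | nil => exact absurd rfl hw
  | cons a t => simp [renderW]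

theorem renderAll_append_singleton (f1 f g : Char → Char) (sep : List Char)
    (vs : List (List Char)) (w : List Char) (hvs : vs ≠ []) :
    renderAll f1 f g sep (vs ++ [w]) = renderAll f1 f g sep vs ++ sep ++ renderW f g w := by
  cases vs with
  | nil => exact absurd rfl hvs
  | cons v vs' => simp [renderAll]

theorem renderAll_extend_last (f1 f g : Char → Char) (sep : List Char)
    (vs : List (List Char)) (w : List Char) (c : Char) (hw : w ≠ []) :
    renderAll f1 f g sep (vs ++ [w ++ [c]]) = renderAll f1 f g sep (vs ++ [w]) ++ [g c] := by
  cases vs with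
  | nil => simp [renderAll, renderW_append _ _ _ _ hw]
  | cons v vs' => simp [renderAll, renderW_append _ _ _ _ hw]

-- the one induction: A's state machine = render of B's word accumulator, for any mode-consistent f1/f/g/sep
theorem pvMain (f1 f g : Char → Char) (sep : List Char) (mode : Int)
    (h0 : ∀ c, do_conv_char c mode 0 = f1 c)
    (h1 : ∀ c, do_conv_char c mode 1 = f c)
    (h2 : ∀ c, do_conv_char c mode 2 = g c)
    (hsep : (if mode = 1 ∨ mode = 2 then (['_'] : List Char) else []) = sep) :
    ∀ (l : List Char) (ws : List (List Char)) (cur : List Char) (prev : Option Char),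
      (cur = [] → (prev = none ∧ ws = []) ∨ (prev = some '_' ∧ ws ≠ [])) →
      (cur ≠ [] → ∃ p, prev = some p ∧ p ≠ '_') →
      (prev = none → cur = [] ∧ ws = [] ∧ l.head? ≠ some '_') →
      renderAll f1 f g sep (pvLoopB ws cur prev l)
        = renderAll f1 f g sep (ws ++ (if cur = [] then [] else [cur])) ++ pvLoopA mode prev l := by
  intro l
  induction l with
  | nil => intro ws cur prev _ _ _; simp [pvLoopB, pvLoopA]
  | cons c r ih =>
    intro ws cur prev H1 H2 H3
    by_cases hc : c = '_'
    · subst hc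
      have hprev : prev ≠ none := by
        intro h; exact (H3 h).2.2 (by simp)
      have hws' : ws ++ (if cur = [] then [] else [cur]) ≠ [] := by
        by_cases hcur : cur = []
        · rcases H1 hcur with ⟨h, _⟩ | ⟨_, hne⟩
          · exact absurd h hprev
          · simpa [hcur] using hne
        · simp [hcur]
      rw [show pvLoopB ws cur prev ('_' :: r)
            = pvLoopB (ws ++ (if cur = [] then [] else [cur])) [] (some '_') r by simp [pvLoopB]]
      rw [show pvLoopA mode prev ('_' :: r) = pvLoopA mode (some '_') r by simp [pvLoopA]]
      rw [ih (ws ++ (if cur = [] then [] else [cur])) [] (some '_')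
            (fun _ => Or.inr ⟨rfl, hws'⟩) (fun h => absurd rfl h) (by simp)]
      simp
    · -- c ≠ '_'
      cases prev with
      | none =>
        obtain ⟨hcur, hws, _⟩ := H3 rfl
        subst hcur hws
        rw [show pvLoopB [] [] none (c :: r) = pvLoopB [] [c] (some c) r by simp [pvLoopB, hc]]
        rw [show pvLoopA mode none (c :: r)
              = do_conv_char c mode 0 :: pvLoopA mode (some c) r by simp [pvLoopA, hc]]
        rw [ih [] [c] (some c) (by simp) (fun _ => ⟨c, rfl, hc⟩) (by simp)]
        simp [renderAll, renderW, h0]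
      | some p =>
        by_cases hp : p = '_'
        · subst hp
          have hcur : cur = [] := by
            by_contra hne
            obtain ⟨q, hq, hq'⟩ := H2 hne
            exact hq' (by injection hq with h; exact h.symm)
          subst hcur
          have hws : ws ≠ [] := by
            rcases H1 rfl with ⟨h, _⟩ | ⟨_, hne⟩
            · exact absurd h (by simp)
            · exact hne
          rw [show pvLoopB ws [] (some '_') (c :: r) = pvLoopB ws [c] (some c) r by
                simp [pvLoopB, hc]]
          rw [show pvLoopA mode (some '_') (c :: r)
                = (if mode = 1 ∨ mode = 2 then ['_'] else []) ++
                    do_conv_char c mode 1 :: pvLoopA mode (some c) r by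
                simp [pvLoopA, hc]]
          rw [ih ws [c] (some c) (by simp) (fun _ => ⟨c, rfl, hc⟩) (by simp)]
          rw [show (if ([c] : List Char) = [] then ([] : List (List Char)) else [[c]]) = [[c]]
                from by simp,
              show (if ([] : List Char) = [] then ([] : List (List Char)) else [[]]) = []
                from by simp]
          rw [renderAll_append_singleton f1 f g sep ws [c] hws]
          simp [renderW, h1, hsep]
        · -- prev = some p, p ≠ '_' : inside a word
          have hcur : cur ≠ [] := by
            intro he
            rcases H1 he with ⟨h, _⟩ | ⟨h, _⟩
            · simp at h
            · exact hp (Option.some_inj.mp h)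
          by_cases hb : PySem.Chars.isupper c = true ∧ PySem.Chars.islower p = true
          · -- boundary: new word
            rw [show pvLoopB ws cur (some p) (c :: r) = pvLoopB (ws ++ [cur]) [c] (some c) r by
                  simp [pvLoopB, pyIsLowerOpt, hc, hcur, hb.1, hb.2]]
            rw [show pvLoopA mode (some p) (c :: r)
                  = (if mode = 1 ∨ mode = 2 then ['_'] else []) ++
                      do_conv_char c mode 1 :: pvLoopA mode (some c) r by
                  simp [pvLoopA, hc, hp, hb.1, hb.2]]
            rw [ih (ws ++ [cur]) [c] (some c) (by simp) (fun _ => ⟨c, rfl, hc⟩) (by simp)]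
            rw [show (if ([c] : List Char) = [] then ([] : List (List Char)) else [[c]]) = [[c]]
                  from by simp,
                if_neg hcur]
            rw [renderAll_append_singleton f1 f g sep (ws ++ [cur]) [c] (by simp)]
            simp [renderW, h1, hsep]
          · -- continuation of the current word
            rw [show pvLoopB ws cur (some p) (c :: r) = pvLoopB ws (cur ++ [c]) (some c) r by
                  have hnb : ¬ (cur ≠ [] ∧ PySem.Chars.isupper c = true ∧
                      pyIsLowerOpt (some p) = true) := by
                    rintro ⟨_, hu, hl⟩
                    exact hb ⟨hu, by simpa [pyIsLowerOpt] using hl⟩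
                  simp only [pvLoopB, if_neg hc, if_neg hnb]]
            rw [show pvLoopA mode (some p) (c :: r)
                  = do_conv_char c mode 2 :: pvLoopA mode (some c) r by
                  have hstat : ¬ (p = '_' ∨ (PySem.Chars.isupper c = true ∧
                      PySem.Chars.islower p = true)) := by
                    rintro (h | h); exact hp h; exact hb h
                  simp [pvLoopA, hc, hstat]]
            rw [ih ws (cur ++ [c]) (some c) (by simp) (fun _ => ⟨c, rfl, hc⟩) (by simp)]
            rw [show (if (cur ++ [c] : List Char) = [] then ([] : List (List Char))
                  else [cur ++ [c]]) = [cur ++ [c]] from by simp,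
                if_neg hcur]
            rw [renderAll_extend_last f1 f g sep ws cur c hcur]
            simp [h2]

-- per-mode: B's renderer is renderAll with the matching parameters
theorem renderB_one (ws : List (List Char)) :
    pvRenderB 1 ws = renderAll PySem.Chars.lowerChar PySem.Chars.lowerChar PySem.Chars.lowerChar ['_'] ws := by
  cases ws with
  | nil => simp [pvRenderB, pyJoin, renderAll]
  | cons w rest => simp [pvRenderB, pyJoin, renderAll, renderW_self, List.flatMap_map]

theorem renderB_two (ws : List (List Char)) :
    pvRenderB 2 ws = renderAll PySem.Chars.upperChar PySem.Chars.upperChar PySem.Chars.upperChar ['_'] ws := by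
  cases ws with
  | nil => simp [pvRenderB, pyJoin, renderAll]
  | cons w rest => simp [pvRenderB, pyJoin, renderAll, renderW_self, List.flatMap_map]

theorem pyCap_eq_renderW (w : List Char) :
    pyCapList w = renderW PySem.Chars.upperChar PySem.Chars.lowerChar w := by
  cases w <;> simp [pyCapList, renderW]

theorem renderB_four (ws : List (List Char)) :
    pvRenderB 4 ws = renderAll PySem.Chars.upperChar PySem.Chars.upperChar PySem.Chars.lowerChar [] ws := by
  cases ws with
  | nil => simp [pvRenderB, pyJoin, renderAll]
  | cons w rest =>
      simp [pvRenderB, pyJoin, renderAll, List.flatMap_map, pyCap_eq_renderW]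

theorem renderB_three (ws : List (List Char)) :
    pvRenderB 3 ws = renderAll PySem.Chars.lowerChar PySem.Chars.upperChar PySem.Chars.lowerChar [] ws := by
  cases ws with
  | nil => simp [pvRenderB, renderAll]
  | cons w rest =>
      cases rest with
      | nil => simp [pvRenderB, pyJoin, renderAll, renderW_self]
      | cons v vs =>
          simp [pvRenderB, pyJoin, renderAll, renderW_self, List.flatMap_map, pyCap_eq_renderW]

theorem renderB_other (mode : Int) (hm1 : mode ≠ 1) (hm2 : mode ≠ 2) (hm3 : mode ≠ 3)
    (hm4 : mode ≠ 4) (ws : List (List Char)) :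
    pvRenderB mode ws = renderAll PySem.Chars.lowerChar PySem.Chars.lowerChar PySem.Chars.lowerChar [] ws := by
  cases ws with
  | nil => simp [pvRenderB, pyJoin, renderAll, hm1, hm2, hm3, hm4]
  | cons w rest =>
      simp [pvRenderB, pyJoin, renderAll, renderW_self, List.flatMap_map, hm1, hm2, hm3, hm4]

-- strip lemmas
theorem stripPreA_eq (l : List Char) :
    pvStripPreA l = (l.takeWhile (· = '_'), l.dropWhile (· = '_')) := by
  induction l with
  | nil => simp [pvStripPreA, List.takeWhile, List.dropWhile]
  | cons c r ih =>
      by_cases hc : c = '_'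
      · subst hc
        simp [pvStripPreA, ih, List.takeWhile_cons, List.dropWhile_cons]
      · simp [pvStripPreA, hc, List.takeWhile_cons, List.dropWhile_cons]

theorem takeWhile_underscore_eq_replicate (l : List Char) :
    l.takeWhile (· = '_') = List.replicate (l.length - (l.dropWhile (· = '_')).length) '_' := by
  induction l with
  | nil => simp
  | cons c r ih =>
      by_cases hc : c = '_'
      · subst hc
        have hle : (r.dropWhile (· = '_')).length ≤ r.length := List.length_dropWhile_le _ _
        have e1 : List.takeWhile (· = '_') ('_' :: r) = '_' :: List.takeWhile (· = '_') r := by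
          simp
        have e2 : List.dropWhile (· = '_') ('_' :: r) = List.dropWhile (· = '_') r := by simp
        rw [e1, e2, ih, List.length_cons,
            show r.length + 1 - (List.dropWhile (· = '_') r).length
              = (r.length - (List.dropWhile (· = '_') r).length) + 1 from by omega,
            List.replicate_succ]
      · simp [List.takeWhile_cons, List.dropWhile_cons, hc]

theorem head?_dropWhile_ne (l : List Char) :
    (l.dropWhile (· = '_')).head? ≠ some '_' := by
  induction l with
  | nil => simp
  | cons c r ih =>
      by_cases hc : c = '_'
      · simpa [List.dropWhile_cons, hc] using ih
      · simp [List.dropWhile_cons, hc]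

-- head of the rstripped core is the head of the lstripped text (core is a prefix of it)
theorem head?_core_ne (t : List Char) (ht : t.head? ≠ some '_') :
    ((t.reverse.dropWhile (· = '_')).reverse).head? ≠ some '_' := by
  have hsuf : t.reverse.dropWhile (· = '_') <:+ t.reverse := List.dropWhile_suffix _
  have hpre : (t.reverse.dropWhile (· = '_')).reverse <+: t := by
    have := List.reverse_prefix.mpr hsuf
    simpa using this
  obtain ⟨rest, hr⟩ := hpre
  cases hcore : (t.reverse.dropWhile (· = '_')).reverse with
  | nil => simp
  | cons a k =>
      rw [hcore] at hr
      intro h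
      have ha : a = '_' := by simpa using h
      subst ha
      apply ht
      rw [← hr]
      simp

-- the assembled theorem for one mode instance
theorem pvModeCase (mode : Int) (f1 f g : Char → Char) (sep : List Char)
    (h0 : ∀ c, do_conv_char c mode 0 = f1 c)
    (h1 : ∀ c, do_conv_char c mode 1 = f c)
    (h2 : ∀ c, do_conv_char c mode 2 = g c)
    (hsep : (if mode = 1 ∨ mode = 2 then (['_'] : List Char) else []) = sep)
    (hrender : ∀ ws, pvRenderB mode ws = renderAll f1 f g sep ws)
    (text : String) :
    do_conv_string text mode = do_conv_string_alt text mode := by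
  unfold do_conv_string do_conv_string_alt
  rw [stripPreA_eq, stripPreA_eq, hrender]
  rw [pvMain f1 f g sep mode h0 h1 h2 hsep _ [] [] none (by simp) (fun h => absurd rfl h)
       (fun _ => ⟨rfl, rfl, head?_core_ne _ (head?_dropWhile_ne _)⟩)]
  rw [takeWhile_underscore_eq_replicate text.toList,
      takeWhile_underscore_eq_replicate (text.toList.dropWhile (· = '_')).reverse]
  simp [renderAll]

-- ===== VERDICT (by name: the statement is the Claim_ definition above) =====
theorem do_conv_string_spec : Claim_equal_do_conv_string := by
  intro text mode _
  unfold Spec_do_conv_string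
  by_cases h1 : mode = 1
  · subst h1
    exact (pvModeCase 1 _ _ _ _ (fun c => by simp [do_conv_char]) (fun c => by simp [do_conv_char])
      (fun c => by simp [do_conv_char]) (by simp) renderB_one text)
  by_cases h2 : mode = 2
  · subst h2
    exact (pvModeCase 2 _ _ _ _ (fun c => by simp [do_conv_char]) (fun c => by simp [do_conv_char])
      (fun c => by simp [do_conv_char]) (by simp) renderB_two text)
  by_cases h3 : mode = 3
  · subst h3
    exact (pvModeCase 3 _ _ _ _ (fun c => by simp [do_conv_char]) (fun c => by simp [do_conv_char])
      (fun c => by simp [do_conv_char]) (by simp) renderB_three text)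
  by_cases h4 : mode = 4
  · subst h4
    exact (pvModeCase 4 _ _ _ _ (fun c => by simp [do_conv_char]) (fun c => by simp [do_conv_char])
      (fun c => by simp [do_conv_char]) (by simp) renderB_four text)
  · exact (pvModeCase mode _ _ _ _ (fun c => by simp [do_conv_char, h1, h2, h3, h4])
      (fun c => by simp [do_conv_char, h1, h2, h3, h4])
      (fun c => by simp [do_conv_char, h1, h2, h3, h4]) (by simp [h1, h2])
      (renderB_other mode h1 h2 h3 h4) text)
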